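-- pv_equiv track=rewrite | github.com/armmoon4/pythonLab_implemention | problemSolving/snowflake.py | generate_snowflake
-- ===== SOURCE A (Python) =====
-- def generate_snowflake(n):
--     # Create an n x n matrix filled with "."
--     matrix = [["." for _ in range(n)] for _ in range(n)]
--
--     mid_row = n // 2
--     for j in range(n):
--         matrix[mid_row][j] = "*"
--
--     mid_col = n // 2
--     for i in range(n):
--         matrix[i][mid_col] = "*"
--
--     for i in range(n):
--         matrix[i][i] = "*"
--         matrix[i][n - i - 1] = "*"
--
--     return matrix
-- ===== SOURCE B (Python) =====
-- def generate_snowflake(n):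
--     # Symmetry-based construction: compute only the top rows (0..mid) directly,
--     # then mirror them to produce the bottom half (row i equals row n-1-i).
--     mid = n // 2
--
--     def row(i):
--         if i == mid:
--             return ["*"] * n
--         return ["*" if j in (i, mid, n - 1 - i) else "." for j in range(n)]
--
--     top = [row(i) for i in range(n) if i <= mid]
--     return top + top[: n - len(top)][::-1]
-- ===== Notes on version B (the rewrite author's own statement) =====
-- stated objective: alternative
-- what changed: Replaces the dot-matrix plus four overlay passes with a symmetry-based construction: the top rows up to the middle are built directly (middle row as all stars, other rows from their three star columns), and the bottom half is obtained by mirroring the top rows, since row i equals row n-1-i.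
import Mathlib
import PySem

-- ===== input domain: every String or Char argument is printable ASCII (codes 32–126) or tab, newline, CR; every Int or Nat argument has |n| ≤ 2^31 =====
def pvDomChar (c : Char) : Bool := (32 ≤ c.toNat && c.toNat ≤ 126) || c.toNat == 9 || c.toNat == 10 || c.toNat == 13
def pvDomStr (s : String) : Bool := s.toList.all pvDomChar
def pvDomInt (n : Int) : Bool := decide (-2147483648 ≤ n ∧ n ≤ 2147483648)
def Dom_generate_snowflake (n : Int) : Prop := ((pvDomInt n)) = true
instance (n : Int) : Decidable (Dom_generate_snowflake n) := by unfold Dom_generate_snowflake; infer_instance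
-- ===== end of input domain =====

-- B replaces A's dot-matrix + four overlay passes by a symmetry-based build:
-- only rows 0..n//2 are computed, the bottom half is their mirror (objective: alternative).

-- ===== PORT A =====
-- matrix[a][b] = "*"  (Python list assignment on a list of rows)
def pvWrite (m : List (List String)) (a b : Int) : List (List String) :=
  PySem.List.pySetD m a (PySem.List.pySetD (PySem.List.pyGetD m a []) b "*")

def generate_snowflake (n : Int) : List (List String) :=
  let matrix := (PySem.List.pyRange 0 n 1).map
    (fun _ => (PySem.List.pyRange 0 n 1).map (fun _ => "."))
  let mid_row := PySem.Int.floordiv n 2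
  let matrix := (PySem.List.pyRange 0 n 1).foldl (fun m j => pvWrite m mid_row j) matrix
  let mid_col := PySem.Int.floordiv n 2
  let matrix := (PySem.List.pyRange 0 n 1).foldl (fun m i => pvWrite m i mid_col) matrix
  let matrix := (PySem.List.pyRange 0 n 1).foldl
    (fun m i => pvWrite (pvWrite m i i) i (n - i - 1)) matrix
  matrix

-- ===== PORT B =====
-- row(i): the middle row is all stars, any other row has stars at columns i, mid, n-1-i
def gsRow (n mid i : Int) : List String :=
  if i = mid then (PySem.List.pyRange 0 n 1).map (fun _ => "*")
  else (PySem.List.pyRange 0 n 1).map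
    (fun j => if j = i ∨ j = mid ∨ j = n - 1 - i then "*" else ".")

def generate_snowflake_alt (n : Int) : List (List String) :=
  let mid := PySem.Int.floordiv n 2
  let top := ((PySem.List.pyRange 0 n 1).filter (fun i => decide (i ≤ mid))).map (gsRow n mid)
  -- top[: n - len(top)][::-1]  ([::-1] is reverse: PySem.List.slice?_none_none_neg_one)
  top ++ (PySem.List.slice top none (some (n - (top.length : Int)))).reverse

-- ===== PRECONDITION & SPEC =====
def Spec_generate_snowflake (n : Int) (out : List (List String)) : Prop := out = generate_snowflake_alt n
instance (n : Int) (out : List (List String)) : Decidable (Spec_generate_snowflake n out) := by unfold Spec_generate_snowflake; infer_instance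

-- ===== CLAIM (what is proved, stated in full; the proofs are below) =====
def Claim_equal_generate_snowflake : Prop := ∀ (n : Int), Dom_generate_snowflake n → Spec_generate_snowflake n (generate_snowflake n)

-- ===== LEMMAS AND PROOFS =====

-- the common yardstick: the snowflake matrix defined cell-by-cell by its predicate
def snowPred (n : Int) : List (List String) :=
  let m := PySem.Int.floordiv n 2
  (PySem.List.pyRange 0 n 1).map (fun i =>
    (PySem.List.pyRange 0 n 1).map (fun j =>
      if i = m ∨ j = m ∨ i = j ∨ i + j = n - 1 then "*" else "."))

-- one predicate row
def snowRow (n mid i : Int) : List String :=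
  (PySem.List.pyRange 0 n 1).map (fun j =>
    if i = mid ∨ j = mid ∨ i = j ∨ i + j = n - 1 then "*" else ".")

-- ---- A-side lemmas ----

-- shape invariants of a single write
lemma length_pvWrite (m : List (List String)) (a b : Int) :
    (pvWrite m a b).length = m.length := by
  simp [pvWrite, PySem.List.length_pySetD]

lemma row_length_pvWrite (m : List (List String)) (a b i : Int)
    (ha : 0 ≤ a) (hi : 0 ≤ i) :
    (PySem.List.pyGetD (pvWrite m a b) i []).length
      = (PySem.List.pyGetD m i []).length := by
  unfold pvWrite
  simp only [PySem.List.pySetD_of_nonneg _ _ ha,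
    PySem.List.pyGetD_of_nonneg _ _ ha, PySem.List.pyGetD_of_nonneg _ _ hi,
    List.getD, List.getElem?_set]
  by_cases h1 : a.toNat = i.toNat
  · by_cases h2 : a.toNat < m.length
    · rw [if_pos h1, if_pos h2, Option.getD_some, PySem.List.length_pySetD, h1]
    · rw [if_pos h1, if_neg h2, Option.getD_none,
          List.getElem?_eq_none (l := m) (by omega : m.length ≤ i.toNat), Option.getD_none]
  · simp [h1]

-- value of a cell after one write (write indices in range, read indices nonneg)
lemma get2_pvWrite (m : List (List String)) (a b i j : Int)
    (ha : 0 ≤ a) (ha' : a < m.length)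
    (hb : 0 ≤ b) (hb' : b < (PySem.List.pyGetD m a []).length)
    (hi : 0 ≤ i) (hj : 0 ≤ j) :
    PySem.List.pyGetD (PySem.List.pyGetD (pvWrite m a b) i []) j "."
      = if i = a ∧ j = b then "*"
        else PySem.List.pyGetD (PySem.List.pyGetD m i []) j "." := by
  unfold pvWrite
  rw [PySem.List.pyGetD_of_nonneg _ _ ha] at hb'
  simp only [PySem.List.pySetD_of_nonneg _ _ ha, PySem.List.pySetD_of_nonneg _ _ hb,
    PySem.List.pyGetD_of_nonneg _ _ ha, PySem.List.pyGetD_of_nonneg _ _ hi,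
    PySem.List.pyGetD_of_nonneg _ _ hj, List.getD, List.getElem?_set]
  by_cases h1 : i = a
  · subst h1
    have hlt : i.toNat < m.length := by omega
    simp only [hlt, if_true, Option.getD_some]
    by_cases h2 : j = b
    · subst h2
      have hlt2 : j.toNat < (m[i.toNat]?.getD []).length := by
        simpa [List.getD] using (by omega : j.toNat < (m.getD i.toNat []).length)
      rw [List.getElem?_set_self hlt2, Option.getD_some]
      simp
    · have hne : b.toNat ≠ j.toNat := by omega
      simp [hne, h2]
  · have hne : a.toNat ≠ i.toNat := by omega
    simp [hne, h1]

-- a fold of writes over a list of cells: a cell reads "*" iff some write hit it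
lemma get2_foldl_writes (ps : List (Int × Int)) (m : List (List String)) (i j : Int)
    (hi : 0 ≤ i) (hj : 0 ≤ j)
    (hp : ∀ p ∈ ps, 0 ≤ p.1 ∧ p.1 < m.length ∧ 0 ≤ p.2 ∧
          p.2 < (PySem.List.pyGetD m p.1 []).length) :
    PySem.List.pyGetD (PySem.List.pyGetD (ps.foldl (fun m p => pvWrite m p.1 p.2) m) i []) j "."
      = if (i, j) ∈ ps then "*"
        else PySem.List.pyGetD (PySem.List.pyGetD m i []) j "." := by
  induction ps generalizing m with
  | nil => simp
  | cons p rest ih =>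
    obtain ⟨h1, h2, h3, h4⟩ := hp p (List.mem_cons_self ..)
    have hp' : ∀ q ∈ rest, 0 ≤ q.1 ∧ q.1 < (pvWrite m p.1 p.2).length ∧ 0 ≤ q.2 ∧
        q.2 < (PySem.List.pyGetD (pvWrite m p.1 p.2) q.1 []).length := by
      intro q hq
      obtain ⟨g1, g2, g3, g4⟩ := hp q (List.mem_cons_of_mem _ hq)
      exact ⟨g1, by rwa [length_pvWrite], g3, by rwa [row_length_pvWrite _ _ _ _ h1 g1]⟩
    rw [List.foldl_cons, ih _ hp', get2_pvWrite m p.1 p.2 i j h1 h2 h3 h4 hi hj]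
    by_cases hmem : (i, j) ∈ rest
    · simp [hmem]
    · by_cases heq : i = p.1 ∧ j = p.2
      · simp [heq.1, heq.2]
      · have : (i, j) ≠ p := by
          intro h; exact heq ⟨by rw [← h], by rw [← h]⟩
        simp [hmem, heq, this]

-- shapes survive a fold of writes with nonnegative row indices
lemma length_foldl_writes (ps : List (Int × Int)) (m : List (List String)) :
    (ps.foldl (fun m p => pvWrite m p.1 p.2) m).length = m.length := by
  induction ps generalizing m with
  | nil => rfl
  | cons p rest ih => rw [List.foldl_cons, ih, length_pvWrite]

lemma row_length_foldl_writes (ps : List (Int × Int)) (m : List (List String)) (i : Int)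
    (hi : 0 ≤ i) (hp : ∀ p ∈ ps, 0 ≤ p.1) :
    (PySem.List.pyGetD (ps.foldl (fun m p => pvWrite m p.1 p.2) m) i []).length
      = (PySem.List.pyGetD m i []).length := by
  induction ps generalizing m with
  | nil => rfl
  | cons p rest ih =>
    rw [List.foldl_cons, ih _ (fun q hq => hp q (List.mem_cons_of_mem _ hq)),
        row_length_pvWrite _ _ _ _ (hp p (List.mem_cons_self ..)) hi]

-- folding a two-write body is folding single writes over the flattened cell list
lemma foldl_flatMap_writes {α β γ : Type} (l : List α) (f : α → List β)
    (g : γ → β → γ) (init : γ) :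
    (l.flatMap f).foldl g init = l.foldl (fun m x => (f x).foldl g m) init := by
  induction l generalizing init with
  | nil => rfl
  | cons x rest ih => rw [List.flatMap_cons, List.foldl_append, List.foldl_cons, ih]

-- A equals the predicate matrix
lemma A_eq_pred (n : Int) : generate_snowflake n = snowPred n := by
  unfold generate_snowflake snowPred
  by_cases hn : n ≤ 0
  · simp [PySem.List.pyRange_one_eq_nil hn]
  rw [not_le] at hn
  set mid := PySem.Int.floordiv n 2 with hmid
  have hmid0 : 0 ≤ mid ∧ mid < n := by
    rw [hmid, PySem.Int.floordiv_eq_ediv_of_pos (a := n) (b := 2) (by norm_num)]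
    constructor <;> omega
  set m0 : List (List String) := (PySem.List.pyRange 0 n 1).map
    (fun _ => (PySem.List.pyRange 0 n 1).map (fun _ => ".")) with hm0
  -- the three overlay loops as one fold of single-cell writes
  set ps : List (Int × Int) :=
      (PySem.List.pyRange 0 n 1).map (fun j => (mid, j))
    ++ (PySem.List.pyRange 0 n 1).map (fun i => (i, mid))
    ++ (PySem.List.pyRange 0 n 1).flatMap (fun i => [(i, i), (i, n - i - 1)]) with hps
  have hfold :
      ((PySem.List.pyRange 0 n 1).foldl
        (fun m i => pvWrite (pvWrite m i i) i (n - i - 1))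
        ((PySem.List.pyRange 0 n 1).foldl (fun m i => pvWrite m i mid)
          ((PySem.List.pyRange 0 n 1).foldl (fun m j => pvWrite m mid j) m0)))
      = ps.foldl (fun m p => pvWrite m p.1 p.2) m0 := by
    rw [hps, List.foldl_append, List.foldl_append, List.foldl_map, List.foldl_map,
        foldl_flatMap_writes]
    rfl
  simp only [hfold]
  -- shape facts
  have hlen0 : m0.length = n.toNat := by
    simp [hm0, PySem.List.length_pyRange_one]
  have hrow0 : ∀ k : Nat, (k < n.toNat) →
      PySem.List.pyGetD m0 (k : Int) [] = (PySem.List.pyRange 0 n 1).map (fun _ => ".") := by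
    intro k hk
    rw [PySem.List.pyGetD_natCast, hm0, List.getD_eq_getElem _ _ (by simpa [PySem.List.length_pyRange_one] using hk)]
    simp
  have hrowlen0 : ∀ i : Int, 0 ≤ i → i < n →
      (PySem.List.pyGetD m0 i []).length = n.toNat := by
    intro i h0 h1
    have : i = ((i.toNat : Nat) : Int) := by omega
    rw [this, hrow0 i.toNat (by omega)]
    simp [PySem.List.length_pyRange_one]
  have hp : ∀ p ∈ ps, 0 ≤ p.1 ∧ p.1 < m0.length ∧ 0 ≤ p.2 ∧
      p.2 < (PySem.List.pyGetD m0 p.1 []).length := by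
    intro p hpmem
    have hb : 0 ≤ p.1 ∧ p.1 < n ∧ 0 ≤ p.2 ∧ p.2 < n := by
      rw [hps] at hpmem
      simp only [List.mem_append, List.mem_map, List.mem_flatMap,
        PySem.List.mem_pyRange_one] at hpmem
      rcases hpmem with (⟨j, hj, rfl⟩ | ⟨i, hi, rfl⟩) | ⟨i, hi, hmem⟩
      · exact ⟨hmid0.1, hmid0.2, hj.1, hj.2⟩
      · exact ⟨hi.1, hi.2, hmid0.1, hmid0.2⟩
      · simp only [List.mem_cons] at hmem
        rcases hmem with rfl | rfl | h
        · exact ⟨hi.1, hi.2, hi.1, hi.2⟩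
        · exact ⟨hi.1, hi.2, by omega, by omega⟩
        · exact absurd h (List.not_mem_nil)
    refine ⟨hb.1, by rw [hlen0]; omega, hb.2.2.1, ?_⟩
    rw [hrowlen0 p.1 hb.1 hb.2.1]; omega
  have hpmem : ∀ i j : Int, 0 ≤ i → i < n → 0 ≤ j → j < n →
      ((i, j) ∈ ps ↔ (i = mid ∨ j = mid ∨ i = j ∨ i + j = n - 1)) := by
    intro i j h0 h1 h2 h3
    rw [hps]
    simp only [List.mem_append, List.mem_map, List.mem_flatMap,
      PySem.List.mem_pyRange_one, List.mem_cons,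
      Prod.mk.injEq, List.not_mem_nil]
    constructor
    · rintro ((⟨a, ha, rfl, rfl⟩ | ⟨a, ha, rfl, rfl⟩) | ⟨a, ha, h⟩)
      · exact Or.inl rfl
      · exact Or.inr (Or.inl rfl)
      · rcases h with ⟨rfl, rfl⟩ | ⟨⟨rfl, rfl⟩ | h⟩
        · exact Or.inr (Or.inr (Or.inl rfl))
        · exact Or.inr (Or.inr (Or.inr (by omega)))
        · exact absurd h id
    · rintro (rfl | rfl | rfl | h4)
      · exact Or.inl (Or.inl ⟨j, ⟨h2, h3⟩, rfl, rfl⟩)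
      · exact Or.inl (Or.inr ⟨i, ⟨h0, h1⟩, rfl, rfl⟩)
      · exact Or.inr ⟨i, ⟨h0, h1⟩, Or.inl ⟨rfl, rfl⟩⟩
      · exact Or.inr ⟨i, ⟨h0, h1⟩, Or.inr (Or.inl ⟨rfl, by omega⟩)⟩
  -- elementwise comparison
  apply List.ext_getElem
  · rw [length_foldl_writes, hlen0]
    simp [PySem.List.length_pyRange_one]
  intro k h1 h2
  have hk : k < n.toNat := by
    simpa [length_foldl_writes, hlen0] using h1
  apply List.ext_getElem
  · have := row_length_foldl_writes ps m0 (k : Int) (by omega) (fun p hp' => (hp p hp').1)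
    rw [← List.getD_eq_getElem _ [] h1, ← PySem.List.pyGetD_natCast, this,
        hrowlen0 (k : Int) (by omega) (by omega)]
    simp [PySem.List.length_pyRange_one]
  intro l hl1 hl2
  have hlb : l < n.toNat := by
    have := row_length_foldl_writes ps m0 (k : Int) (by omega) (fun p hp' => (hp p hp').1)
    rw [← List.getD_eq_getElem _ [] h1, ← PySem.List.pyGetD_natCast, this,
        hrowlen0 (k : Int) (by omega) (by omega)] at hl1
    exact hl1
  -- left side as a pyGetD
  have hL :
      (ps.foldl (fun m p => pvWrite m p.1 p.2) m0)[k][l]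
        = PySem.List.pyGetD
            (PySem.List.pyGetD (ps.foldl (fun m p => pvWrite m p.1 p.2) m0) (k : Int) []) (l : Int) "." := by
    rw [PySem.List.pyGetD_natCast, PySem.List.pyGetD_natCast,
        List.getD_eq_getElem _ [] h1, List.getD_eq_getElem _ "." hl1]
  rw [hL, get2_foldl_writes ps m0 (k : Int) (l : Int) (by omega) (by omega) hp]
  simp only [hpmem (k : Int) (l : Int) (by omega) (by omega) (by omega) (by omega)]
  -- right side: compute the predicate cell
  simp only [List.getElem_map, PySem.List.getElem_pyRange_one, zero_add]
  by_cases hcond : (k : Int) = mid ∨ (l : Int) = mid ∨ (k : Int) = (l : Int) ∨ (k : Int) + (l : Int) = n - 1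
  · rw [if_pos hcond, if_pos hcond]
  · rw [if_neg hcond, if_neg hcond,
        ← Int.toNat_of_nonneg (a := (k : Int)) (by omega)]
    rw [Int.toNat_natCast, hrow0 k hk, PySem.List.pyGetD_natCast,
        List.getD_eq_getElem _ "." (by simpa [PySem.List.length_pyRange_one] using hlb)]
    simp

-- ---- B-side lemmas ----

-- B's row function computes the predicate row
lemma gsRow_eq_snowRow (n mid i : Int) : gsRow n mid i = snowRow n mid i := by
  unfold gsRow snowRow
  by_cases h : i = mid
  · rw [if_pos h]
    exact List.map_congr_left (fun j _ => by rw [if_pos (Or.inl h)])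
  · rw [if_neg h]
    exact List.map_congr_left (fun j _ =>
      if_congr (by constructor <;> (intro hc; omega)) rfl rfl)

-- the snowflake's vertical symmetry: rows i and n-1-i (both off the middle) are equal
lemma snowRow_symm (n mid i i' : Int) (h : i ≠ mid) (h' : i' ≠ mid)
    (hsum : i + i' = n - 1) : snowRow n mid i = snowRow n mid i' := by
  unfold snowRow
  exact List.map_congr_left (fun j _ =>
    if_congr (by constructor <;> (intro hc; omega)) rfl rfl)

-- B equals the predicate matrix
lemma B_eq_pred (n : Int) : generate_snowflake_alt n = snowPred n := by
  rw [show snowPred n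
      = (PySem.List.pyRange 0 n 1).map (snowRow n (PySem.Int.floordiv n 2)) from rfl]
  unfold generate_snowflake_alt
  by_cases hn : n ≤ 0
  · simp [PySem.List.pyRange_one_eq_nil hn, PySem.List.slice]
  rw [not_le] at hn
  set mid := PySem.Int.floordiv n 2 with hmid
  have hm : mid = n / 2 := by
    rw [hmid, PySem.Int.floordiv_eq_ediv_of_pos (a := n) (b := 2) (by norm_num)]
  -- the filtered range is exactly range(0, mid+1)
  have hfilter : (PySem.List.pyRange 0 n 1).filter (fun i => decide (i ≤ mid))
      = PySem.List.pyRange 0 (mid + 1) 1 := by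
    rw [PySem.List.pyRange_one_append 0 (mid + 1) n (by omega) (by omega), List.filter_append]
    have h1 : (PySem.List.pyRange 0 (mid + 1) 1).filter (fun i => decide (i ≤ mid))
        = PySem.List.pyRange 0 (mid + 1) 1 := by
      apply List.filter_eq_self.mpr
      intro x hx
      rw [PySem.List.mem_pyRange_one] at hx
      simp only [decide_eq_true_eq]; omega
    have h2 : (PySem.List.pyRange (mid + 1) n 1).filter (fun i => decide (i ≤ mid)) = [] := by
      apply List.filter_eq_nil_iff.mpr
      intro x hx
      rw [PySem.List.mem_pyRange_one] at hx
      simp only [decide_eq_true_eq]; omega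
    rw [h1, h2, List.append_nil]
  have htop : (PySem.List.pyRange 0 (mid + 1) 1).map (gsRow n mid)
      = (PySem.List.pyRange 0 (mid + 1) 1).map (snowRow n mid) :=
    List.map_congr_left (fun i _ => gsRow_eq_snowRow n mid i)
  simp only [hfilter, htop]
  have hlen : ((((PySem.List.pyRange 0 (mid + 1) 1).map (snowRow n mid)).length : Nat) : Int)
      = mid + 1 := by
    rw [List.length_map, PySem.List.length_pyRange_one]; omega
  rw [hlen]
  set k : Int := n - (mid + 1) with hk
  have hk0 : 0 ≤ k := by omega
  -- the slice is the first k rows, i.e. rows 0..k-1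
  have hslice : PySem.List.slice ((PySem.List.pyRange 0 (mid + 1) 1).map (snowRow n mid))
        none (some k)
      = (PySem.List.pyRange 0 k 1).map (snowRow n mid) := by
    rw [PySem.List.slice_to _ hk0, ← List.map_take]
    congr 1
    rw [PySem.List.pyRange_one_append 0 k (mid + 1) (by omega) (by omega)]
    exact List.take_left' (by rw [PySem.List.length_pyRange_one]; omega)
  rw [hslice]
  -- split the full range at mid+1 and compare the two halves
  rw [PySem.List.pyRange_one_append 0 (mid + 1) n (by omega) (by omega), List.map_append]
  congr 1
  -- bottom half = reversed top rows 0..k-1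
  apply List.ext_getElem
  · simp only [List.length_map, List.length_reverse, PySem.List.length_pyRange_one]; omega
  intro t ht1 ht2
  have htk : t < k.toNat := by
    simpa [PySem.List.length_pyRange_one] using ht2
  rw [List.getElem_map, PySem.List.getElem_pyRange_one, List.getElem_reverse,
      List.getElem_map, PySem.List.getElem_pyRange_one]
  have hcast : ((((PySem.List.pyRange 0 k 1).map (snowRow n mid)).length - 1 - t : Nat) : Int)
      = k - 1 - t := by
    simp only [List.length_map, PySem.List.length_pyRange_one]; omega
  rw [hcast]
  apply snowRow_symm <;> omega

-- ===== VERDICT (by name: the statement is the Claim_ definition above) =====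
theorem generate_snowflake_spec : Claim_equal_generate_snowflake := by
  intro n _
  unfold Spec_generate_snowflake
  rw [A_eq_pred, B_eq_pred]
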